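-- pv_equiv track=rewrite | github.com/Ignaciovf/methane_leaks | contact_scraper.py | _best_email
-- ===== SOURCE A (Python) =====
-- from typing import List, Dict, Any, Tuple, Optional, Callable
--
-- def _best_email(emails: List[str], domain: str) -> str:
--     """Pick a sensible email: same-domain preferred, otherwise role-ish, else first."""
--     if not emails:
--         return ""
--     if domain:
--         domain_hits = [e for e in emails if domain in e]
--         if domain_hits:
--             for e in domain_hits:
--                 if "noreply" not in e and "no-reply" not in e:
--                     return e
--             return domain_hits[0]
--     role_order = ["environment", "env@", "compliance", "operations", "ops@", "sustainability",
--                   "esg", "media", "press", "investor", "ir@"]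
--     for role in role_order:
--         for e in emails:
--             if role in e:
--                 return e
--     return emails[0]
-- ===== SOURCE B (Python) =====
-- from typing import List
--
-- _ROLES = ["environment", "env@", "compliance", "operations", "ops@", "sustainability",
--           "esg", "media", "press", "investor", "ir@"]
--
--
-- def _role_rank(e: str) -> int:
--     for i, r in enumerate(_ROLES):
--         if r in e:
--             return i
--     return len(_ROLES)
--
--
-- def _best_email(emails: List[str], domain: str) -> str:
--     """Pick a sensible email by minimizing a priority key (first minimum wins)."""
--     if not emails:
--         return ""
--     if domain and any(domain in e for e in emails):
--         def key(e: str) -> int: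
--             if domain in e:
--                 return 1 if ("noreply" in e or "no-reply" in e) else 0
--             return 2
--     else:
--         key = _role_rank
--     return min(emails, key=key)
-- ===== Notes on version B (the rewrite author's own statement) =====
-- stated objective: alternative
-- what changed: Replaced the roles-outer/emails-inner nested scan and the separate domain-hit filter pass with a single pass computing one numeric priority key per email (domain tiers or first-matching-role rank) and taking the first key-minimal email.
import Mathlib
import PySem

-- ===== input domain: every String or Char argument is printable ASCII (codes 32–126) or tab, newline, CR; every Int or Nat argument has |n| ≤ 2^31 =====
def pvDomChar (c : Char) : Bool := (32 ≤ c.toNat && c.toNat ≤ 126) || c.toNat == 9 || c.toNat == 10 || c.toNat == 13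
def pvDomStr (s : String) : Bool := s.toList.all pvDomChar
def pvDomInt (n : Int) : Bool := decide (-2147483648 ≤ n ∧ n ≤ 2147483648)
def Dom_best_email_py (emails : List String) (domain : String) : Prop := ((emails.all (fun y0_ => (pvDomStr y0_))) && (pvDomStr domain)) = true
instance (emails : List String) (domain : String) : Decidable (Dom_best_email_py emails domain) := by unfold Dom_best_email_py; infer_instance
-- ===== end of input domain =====

-- B replaces A's roles-outer/emails-inner nested scan (plus separate domain-hit pass) by one
-- numeric priority key per email and a single first-minimum selection; same cost, different shape.

-- ===== PORT A =====
def pvRoles : List String := ["environment", "env@", "compliance", "operations", "ops@", "sustainability",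
  "esg", "media", "press", "investor", "ir@"]

-- 'for role in role_order: for e in emails: if role in e: return e'
def pvRoleLoopA : List String → List String → Option String
  | [], _ => none
  | r :: rs, emails =>
    match emails.find? (fun e => PySem.Str.isIn r e) with
    | some e => some e
    | none => pvRoleLoopA rs emails

def best_email_py (emails : List String) (domain : String) : String :=
  match emails with
  | [] => ""
  | e0 :: _ =>
    let viaDomain : Option String :=
      if domain ≠ "" then
        let hits := emails.filter (fun e => PySem.Str.isIn domain e)
        match hits with
        | [] => none
        | h0 :: _ =>
          match hits.find? (fun e => !PySem.Str.isIn "noreply" e && !PySem.Str.isIn "no-reply" e) with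
          | some e => some e
          | none => some h0
      else none
    match viaDomain with
    | some e => e
    | none =>
      match pvRoleLoopA pvRoles emails with
      | some e => e
      | none => e0

-- ===== PORT B =====
-- '_role_rank': index of the first role contained in e, else len(_ROLES)
def pvRoleRank : List String → String → Nat
  | [], _ => 0
  | r :: rs, e => if PySem.Str.isIn r e then 0 else 1 + pvRoleRank rs e

def pvKeyB (hasDomain : Bool) (domain : String) (e : String) : Nat :=
  if hasDomain then
    if PySem.Str.isIn domain e then
      if PySem.Str.isIn "noreply" e || PySem.Str.isIn "no-reply" e then 1 else 0
    else 2
  else pvRoleRank pvRoles e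

def best_email_py_alt (emails : List String) (domain : String) : String :=
  match emails with
  | [] => ""
  | _ :: _ =>
    let hasDomain := !(domain == "") && emails.any (fun e => PySem.Str.isIn domain e)
    (PySem.List.min? emails (pvKeyB hasDomain domain)).getD ""

-- ===== PRECONDITION & SPEC =====
def Spec_best_email_py (emails : List String) (domain : String) (out : String) : Prop := out = best_email_py_alt emails domain
instance (emails : List String) (domain : String) (out : String) : Decidable (Spec_best_email_py emails domain out) := by unfold Spec_best_email_py; infer_instance

-- ===== CLAIM (what is proved, stated in full; the proofs are below) =====
def Claim_equal_best_email_py : Prop := ∀ (emails : List String) (domain : String), Dom_best_email_py emails domain → Spec_best_email_py emails domain (best_email_py emails domain)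

-- ===== LEMMAS AND PROOFS =====

lemma pvFind?_congr {α : Type} (p q : α → Bool) :
    ∀ (l : List α), (∀ x ∈ l, p x = q x) → l.find? p = l.find? q := by
  intro l
  induction l with
  | nil => intro _; rfl
  | cons a t ih =>
    intro h
    have ha := h a (List.mem_cons_self ..)
    simp only [List.find?_cons, ha]
    cases q a with
    | true => rfl
    | false => exact ih (fun x hx => h x (List.mem_cons_of_mem _ hx))

def pvStep (k : String → Nat) (acc : Option String) (x : String) : Option String :=
  match acc with
  | none => some x
  | some mm => if k x < k mm then some x else some mm

lemma pvMinFoldl (k : String → Nat) (m : Nat) :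
    ∀ (t : List String) (b : String),
      (∀ x ∈ b :: t, m ≤ k x) → (∃ x ∈ b :: t, k x = m) →
      t.foldl (pvStep k) (some b) = (b :: t).find? (fun x => k x == m) := by
  intro t
  induction t with
  | nil =>
    intro b hmin hex
    obtain ⟨x, hx, hkx⟩ := hex
    rw [List.mem_singleton] at hx
    subst hx
    simp [List.find?, hkx]
  | cons a t' ih =>
    intro b hmin hex
    rw [List.foldl_cons]
    have hmb : m ≤ k b := hmin b (List.mem_cons_self ..)
    have hka : m ≤ k a := hmin a (by simp)
    by_cases hb : k b = m
    · have hstep : pvStep k (some b) a = some b := by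
        simp only [pvStep, if_neg (by omega : ¬ k a < k b)]
      rw [hstep]
      have hmin' : ∀ x ∈ b :: t', m ≤ k x := by
        intro x hx
        rcases List.mem_cons.mp hx with h | h
        · subst h; exact hmb
        · exact hmin x (by simp [h])
      rw [ih b hmin' ⟨b, List.mem_cons_self .., hb⟩]
      simp [hb]
    · have hfb : (k b == m) = false := by simp [hb]
      by_cases ha : k a < k b
      · have hstep : pvStep k (some b) a = some a := by
          simp only [pvStep, if_pos ha]
        rw [hstep]
        have hex' : ∃ x ∈ a :: t', k x = m := by
          obtain ⟨x, hx, hkx⟩ := hex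
          rcases List.mem_cons.mp hx with h | h
          · subst h; exact absurd hkx hb
          · exact ⟨x, h, hkx⟩
        have hmin' : ∀ x ∈ a :: t', m ≤ k x := fun x hx => hmin x (by
          rcases List.mem_cons.mp hx with h | h
          · simp [h]
          · simp [h])
        rw [ih a hmin' hex']
        simp [List.find?_cons, hfb]
      · have hstep : pvStep k (some b) a = some b := by
          simp only [pvStep, if_neg ha]
        rw [hstep]
        have hkam : k a ≠ m := by omega
        have hex' : ∃ x ∈ b :: t', k x = m := by
          obtain ⟨x, hx, hkx⟩ := hex
          rcases List.mem_cons.mp hx with h | h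
          · subst h; exact absurd hkx hb
          · rcases List.mem_cons.mp h with h2 | h2
            · subst h2; exact absurd hkx hkam
            · exact ⟨x, by simp [h2], hkx⟩
        have hmin' : ∀ x ∈ b :: t', m ≤ k x := by
          intro x hx
          rcases List.mem_cons.mp hx with h | h
          · subst h; exact hmb
          · exact hmin x (by simp [h])
        rw [ih b hmin' hex']
        simp [hfb, show (k a == m) = false by simp [hkam]]

lemma pvMin?_eq_foldl (k : String → Nat) (xs : List String) :
    PySem.List.min? xs k = List.foldl (pvStep k) none xs := by
  unfold PySem.List.min?
  congr 1
  funext acc x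
  cases acc <;> rfl

lemma pvMin?_eq_find? (k : String → Nat) (xs : List String) (m : Nat)
    (hne : xs ≠ []) (hmin : ∀ x ∈ xs, m ≤ k x) (hex : ∃ x ∈ xs, k x = m) :
    PySem.List.min? xs k = xs.find? (fun x => k x == m) := by
  cases xs with
  | nil => exact absurd rfl hne
  | cons b t =>
    rw [pvMin?_eq_foldl k (b :: t), List.foldl_cons]
    exact pvMinFoldl k m t b hmin hex

lemma pvRole_min (roles : List String) (e0 : String) (rest : List String) :
    PySem.List.min? (e0 :: rest) (pvRoleRank roles)
      = some ((pvRoleLoopA roles (e0 :: rest)).getD e0) := by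
  induction roles with
  | nil =>
    rw [pvMin?_eq_find? _ _ 0 (by simp) (fun x _ => Nat.zero_le _)
          ⟨e0, List.mem_cons_self .., rfl⟩]
    simp [pvRoleLoopA, pvRoleRank]
  | cons r rs ih =>
    cases hfind : (e0 :: rest).find? (fun e => PySem.Str.isIn r e) with
    | some e =>
      have he : e ∈ e0 :: rest := List.mem_of_find?_eq_some hfind
      have hr : PySem.Str.isIn r e = true := List.find?_some hfind
      rw [pvMin?_eq_find? _ _ 0 (by simp) (fun x _ => Nat.zero_le _)
            ⟨e, he, by simp only [pvRoleRank]; rw [if_pos hr]⟩]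
      have hcong : (e0 :: rest).find? (fun x => pvRoleRank (r :: rs) x == 0)
          = (e0 :: rest).find? (fun e => PySem.Str.isIn r e) := by
        apply pvFind?_congr
        intro x _
        simp only [pvRoleRank]
        cases h : PySem.Str.isIn r x <;> simp
      rw [hcong, hfind]
      simp only [pvRoleLoopA, hfind, Option.getD_some]
    | none =>
      have hall : ∀ x ∈ e0 :: rest, PySem.Str.isIn r x = false := by
        intro x hx
        exact Bool.eq_false_iff.mpr (List.find?_eq_none.mp hfind x hx)
      have hshift : ∀ x ∈ e0 :: rest, pvRoleRank (r :: rs) x = 1 + pvRoleRank rs x := by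
        intro x hx
        simp only [pvRoleRank]
        rw [if_neg (fun hc => by rw [hall x hx] at hc; exact absurd hc (by decide))]
      cases hmin : PySem.List.min? (e0 :: rest) (pvRoleRank rs) with
      | none => exact absurd ((PySem.List.min?_eq_none_iff _ _).mp hmin) (by simp)
      | some w =>
        have hw : w ∈ e0 :: rest := PySem.List.min?_mem hmin
        have hwmin : ∀ y ∈ e0 :: rest, pvRoleRank rs w ≤ pvRoleRank rs y :=
          PySem.List.min?_isMin hmin
        rw [pvMin?_eq_find? _ _ (1 + pvRoleRank rs w) (by simp)
              (fun x hx => by rw [hshift x hx]; exact Nat.add_le_add_left (hwmin x hx) 1)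
              ⟨w, hw, hshift w hw⟩]
        have hcong : (e0 :: rest).find? (fun x => pvRoleRank (r :: rs) x == 1 + pvRoleRank rs w)
            = (e0 :: rest).find? (fun x => pvRoleRank rs x == pvRoleRank rs w) := by
          apply pvFind?_congr
          intro x hx
          rw [hshift x hx]
          by_cases h : pvRoleRank rs x = pvRoleRank rs w
          · simp [h]
          · simp
        rw [hcong, ← pvMin?_eq_find? _ _ (pvRoleRank rs w) (by simp) hwmin ⟨w, hw, rfl⟩, ih]
        simp only [pvRoleLoopA, hfind]

theorem pv_main (emails : List String) (domain : String) :
    best_email_py emails domain = best_email_py_alt emails domain := by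
  cases emails with
  | nil => rfl
  | cons e0 rest =>
    simp only [best_email_py, best_email_py_alt]
    by_cases hd : domain = ""
    · subst hd
      rw [if_neg (by simp)]
      simp only [beq_self_eq_true, Bool.not_true, Bool.false_and]
      rw [show pvKeyB false "" = pvRoleRank pvRoles from rfl, pvRole_min]
      cases hloop : pvRoleLoopA pvRoles (e0 :: rest) <;> simp
    · rw [if_pos hd]
      simp only [show (domain == "") = false by simp [hd], Bool.not_false, Bool.true_and]
      cases hany : (e0 :: rest).any (fun e => PySem.Str.isIn domain e) with
      | false =>
        have hfilter : (e0 :: rest).filter (fun e => PySem.Str.isIn domain e) = [] := by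
          rw [List.filter_eq_nil_iff]
          intro x hx
          exact (List.any_eq_false.mp hany) x hx
        rw [hfilter]
        rw [show pvKeyB false domain = pvRoleRank pvRoles from rfl, pvRole_min]
        cases hloop : pvRoleLoopA pvRoles (e0 :: rest) <;> simp
      | true =>
        cases hhits : (e0 :: rest).filter (fun e => PySem.Str.isIn domain e) with
        | nil =>
          obtain ⟨x, hx, hpx⟩ := List.any_eq_true.mp hany
          have : x ∈ (e0 :: rest).filter (fun e => PySem.Str.isIn domain e) :=
            List.mem_filter.mpr ⟨hx, hpx⟩
          rw [hhits] at this
          exact absurd this (List.not_mem_nil)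
        | cons h0 hs =>
          cases hgood : (h0 :: hs).find?
              (fun e => !PySem.Str.isIn "noreply" e && !PySem.Str.isIn "no-reply" e) with
          | some e =>
            have hemem : e ∈ h0 :: hs := List.mem_of_find?_eq_some hgood
            have hefil : e ∈ (e0 :: rest).filter (fun e => PySem.Str.isIn domain e) := by
              rw [hhits]; exact hemem
            have hee : e ∈ e0 :: rest := (List.mem_filter.mp hefil).1
            have hpe : PySem.Str.isIn domain e = true := (List.mem_filter.mp hefil).2
            have hge' := List.find?_some hgood
            have hge : ((!PySem.Str.isIn "noreply" e) && (!PySem.Str.isIn "no-reply" e)) = true := hge'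
            have hkey : pvKeyB true domain e = 0 := by
              show (if PySem.Str.isIn domain e = true then
                      if (PySem.Str.isIn "noreply" e || PySem.Str.isIn "no-reply" e) = true
                      then 1 else 0
                    else 2) = 0
              rw [if_pos hpe, if_neg]
              intro hc
              rcases Bool.or_eq_true_iff.mp hc with h | h <;> rw [h] at hge <;> simp at hge
            rw [pvMin?_eq_find? _ _ 0 (by simp) (fun x _ => Nat.zero_le _) ⟨e, hee, hkey⟩]
            have hcong : (e0 :: rest).find? (fun x => pvKeyB true domain x == 0)
                = (e0 :: rest).find? (fun x =>
                    ((!PySem.Str.isIn "noreply" x) && (!PySem.Str.isIn "no-reply" x))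
                      && PySem.Str.isIn domain x) := by
              apply pvFind?_congr
              intro x _
              show ((if PySem.Str.isIn domain x = true then
                       if (PySem.Str.isIn "noreply" x || PySem.Str.isIn "no-reply" x) = true
                       then 1 else 0
                     else 2) == 0)
                  = (((!PySem.Str.isIn "noreply" x) && (!PySem.Str.isIn "no-reply" x))
                      && PySem.Str.isIn domain x)
              cases h1 : PySem.Str.isIn domain x <;>
                cases h2 : PySem.Str.isIn "noreply" x <;>
                  cases h3 : PySem.Str.isIn "no-reply" x <;> rfl
            rw [hcong, ← List.head?_filter, ← List.filter_filter, hhits, List.head?_filter,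
                hgood]
            rfl
          | none =>
            have hbad : ∀ x ∈ h0 :: hs,
                (PySem.Str.isIn "noreply" x || PySem.Str.isIn "no-reply" x) = true := by
              intro x hx
              have hb := List.find?_eq_none.mp hgood x hx
              have hb' : ((!PySem.Str.isIn "noreply" x) && (!PySem.Str.isIn "no-reply" x))
                  = false := Bool.eq_false_iff.mpr hb
              revert hb'
              cases h2 : PySem.Str.isIn "noreply" x <;>
                cases h3 : PySem.Str.isIn "no-reply" x <;> decide
            have hmemf : ∀ x ∈ e0 :: rest, PySem.Str.isIn domain x = true → x ∈ h0 :: hs := by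
              intro x hx hpx
              rw [← hhits]
              exact List.mem_filter.mpr ⟨hx, hpx⟩
            have hkx : ∀ x ∈ e0 :: rest, PySem.Str.isIn domain x = true →
                pvKeyB true domain x = 1 := by
              intro x hx hpx
              show (if PySem.Str.isIn domain x = true then
                      if (PySem.Str.isIn "noreply" x || PySem.Str.isIn "no-reply" x) = true
                      then 1 else 0
                    else 2) = 1
              rw [if_pos hpx, if_pos (hbad x (hmemf x hx hpx))]
            have hkx2 : ∀ x ∈ e0 :: rest, PySem.Str.isIn domain x = false →
                pvKeyB true domain x = 2 := by
              intro x hx hpx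
              show (if PySem.Str.isIn domain x = true then
                      if (PySem.Str.isIn "noreply" x || PySem.Str.isIn "no-reply" x) = true
                      then 1 else 0
                    else 2) = 2
              rw [if_neg]
              rw [hpx]
              decide
            have hp0 : h0 ∈ (e0 :: rest).filter (fun e => PySem.Str.isIn domain e) := by
              rw [hhits]
              exact List.mem_cons_self ..
            have h0mem : h0 ∈ e0 :: rest := (List.mem_filter.mp hp0).1
            have h0p : PySem.Str.isIn domain h0 = true := (List.mem_filter.mp hp0).2
            have hmin1 : ∀ x ∈ e0 :: rest, 1 ≤ pvKeyB true domain x := by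
              intro x hx
              cases hpx : PySem.Str.isIn domain x
              · rw [hkx2 x hx hpx]
                omega
              · rw [hkx x hx hpx]
            rw [pvMin?_eq_find? _ _ 1 (by simp) hmin1 ⟨h0, h0mem, hkx h0 h0mem h0p⟩]
            have hcong : (e0 :: rest).find? (fun x => pvKeyB true domain x == 1)
                = (e0 :: rest).find? (fun e => PySem.Str.isIn domain e) := by
              apply pvFind?_congr
              intro x hx
              show (pvKeyB true domain x == 1) = PySem.Str.isIn domain x
              cases hpx : PySem.Str.isIn domain x
              · rw [hkx2 x hx hpx]
                rfl
              · rw [hkx x hx hpx]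
                rfl
            rw [hcong, ← List.head?_filter, hhits]
            rfl

-- ===== VERDICT (by name: the statement is the Claim_ definition above) =====
theorem best_email_py_spec : Claim_equal_best_email_py := by
  intro emails domain _
  exact pv_main emails domain
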